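-- pv_equiv track=rewrite | github.com/Saviorovo/task4 | main.py | get
-- ===== SOURCE A (Python) =====
-- def get(data):
--     s,t=[],[]
--     s1,t1=[],[]
--     for x in data:
--         if len(x)==0:
--             if s1:
--                 s.append(s1)
--                 t.append(t1)
--                 s1,t1=[],[]
--         else:
--             s1.append(x[0])
--             t1.append(x[1])
--     if s1:
--         s.append(s1)
--         t.append(t1)
--
--     c=[list(x) for x in zip(s,t)]
--     return c
-- ===== SOURCE B (Python) =====
-- def _split_run(data):
--     # first maximal run of nonempty rows, and the remainder of the list
--     run = []
--     rest = data
--     while rest and len(rest[0]) != 0: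
--         run.append(rest[0])
--         rest = rest[1:]
--     return run, rest
--
--
-- def get(data):
--     if not data:
--         return []
--     if len(data[0]) == 0:
--         return get(data[1:])
--     run, rest = _split_run(data)
--     return [[[r[0] for r in run], [r[1] for r in run]]] + get(rest)
-- ===== Notes on version B (the rewrite author's own statement) =====
-- stated objective: alternative
-- what changed: B recursively splits the list into maximal runs of nonempty rows and maps each run to its two column lists, instead of threading s/t/s1/t1 accumulators with flush-on-empty and a final zip.
-- outside the precondition, e.g. on get([[1]]): A raises IndexError, B raises IndexError
import Mathlib
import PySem

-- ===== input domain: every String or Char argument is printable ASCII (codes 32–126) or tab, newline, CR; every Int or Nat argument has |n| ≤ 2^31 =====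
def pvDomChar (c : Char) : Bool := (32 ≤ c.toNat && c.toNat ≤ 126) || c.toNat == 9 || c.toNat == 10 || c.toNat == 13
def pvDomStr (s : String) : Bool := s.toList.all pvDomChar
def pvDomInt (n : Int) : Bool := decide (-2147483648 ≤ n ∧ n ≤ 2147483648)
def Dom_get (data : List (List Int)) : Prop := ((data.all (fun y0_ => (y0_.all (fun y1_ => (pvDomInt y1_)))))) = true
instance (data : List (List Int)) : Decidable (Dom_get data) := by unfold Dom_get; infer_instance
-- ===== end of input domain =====

-- B recursively splits the list into maximal runs of nonempty rows and maps each run to its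
-- two column lists, instead of A's threaded s/t/s1/t1 accumulators with flush-on-empty and a final zip.

-- ===== PORT A =====
-- loop body of A's `for x in data`, over the state (s, t, s1, t1)
def pvStep (acc : List (List Int) × List (List Int) × List Int × List Int)
    (x : List Int) : List (List Int) × List (List Int) × List Int × List Int :=
  match acc with
  | (s, t, s1, t1) =>
    if x.length == 0 then
      if s1 = [] then (s, t, s1, t1)
      else (s ++ [s1], t ++ [t1], [], [])
    else
      (s, t, s1 ++ [x.getD 0 0], t1 ++ [x.getD 1 0])  -- x[0], x[1]: in range under Pre_get

def get (data : List (List Int)) : List (List (List Int)) :=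
  match data.foldl pvStep ([], [], [], []) with
  | (s, t, s1, t1) =>
    let st := if s1 = [] then (s, t) else (s ++ [s1], t ++ [t1])
    (st.1.zip st.2).map (fun p => [p.1, p.2])

-- ===== PORT B =====
-- _split_run: first maximal run of nonempty rows, and the remainder of the list
def splitRun : List (List Int) → List (List Int) × List (List Int)
  | [] => ([], [])
  | x :: xs =>
    if x.length == 0 then ([], x :: xs)
    else
      let p := splitRun xs
      (x :: p.1, p.2)

theorem splitRun_rest_le (l : List (List Int)) : (splitRun l).2.length ≤ l.length := by
  induction l with
  | nil => simp [splitRun]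
  | cons x xs ih =>
    simp only [splitRun]
    split
    · simp
    · exact Nat.le_succ_of_le ih

def get_alt : List (List Int) → List (List (List Int))
  | [] => []
  | x :: xs =>
    if x.length == 0 then get_alt xs
    else
      let p := splitRun xs
      let run := x :: p.1
      [run.map (fun r => r.getD 0 0), run.map (fun r => r.getD 1 0)] :: get_alt p.2
termination_by l => l.length
decreasing_by
  · simp
  · exact Nat.lt_succ_of_le (splitRun_rest_le xs)

-- ===== PRECONDITION & SPEC =====
-- Pre_ excludes rows of length exactly 1, on which A raises IndexError at x[1].
def Pre_get (data : List (List Int)) : Prop :=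
  ∀ x ∈ data, x.length = 0 ∨ 2 ≤ x.length
instance (data : List (List Int)) : Decidable (Pre_get data) := by unfold Pre_get; infer_instance

def pvWitness_get : List (List Int) := [[1, 2], [], [3, 4], [5, 6]]

def Spec_get (data : List (List Int)) (out : List (List (List Int))) : Prop := out = get_alt data
instance (data : List (List Int)) (out : List (List (List Int))) : Decidable (Spec_get data out) := by unfold Spec_get; infer_instance

-- ===== CLAIM (what is proved, stated in full; the proofs are below) =====
def Claim_equal_get : Prop := ∀ (data : List (List Int)), Dom_get data → Pre_get data → Spec_get data (get data)

-- ===== LEMMAS AND PROOFS =====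

-- A's epilogue (final flush + zip) as a function of the fold state
def pvFin (q : List (List Int) × List (List Int) × List Int × List Int) : List (List (List Int)) :=
  match q with
  | (s, t, s1, t1) =>
    let st := if s1 = [] then (s, t) else (s ++ [s1], t ++ [t1])
    (st.1.zip st.2).map (fun p => [p.1, p.2])

-- what B produces from a pending partial segment (s1, t1) followed by `data`
def pvG (s1 t1 : List Int) (data : List (List Int)) : List (List (List Int)) :=
  if s1 = [] then get_alt data
  else
    [s1 ++ ((splitRun data).1).map (fun r => r.getD 0 0),
     t1 ++ ((splitRun data).1).map (fun r => r.getD 1 0)] :: get_alt (splitRun data).2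

theorem pvMain (data : List (List Int)) :
    ∀ (s t : List (List Int)) (s1 t1 : List Int), s.length = t.length → s1.length = t1.length →
    pvFin (data.foldl pvStep (s, t, s1, t1)) =
      (s.zip t).map (fun p => [p.1, p.2]) ++ pvG s1 t1 data := by
  induction data with
  | nil =>
    intro s t s1 t1 h h2
    by_cases hs : s1 = []
    · simp [pvFin, pvG, hs, get_alt]
    · simp [pvFin, pvG, hs, get_alt, splitRun, List.zip_append h]
  | cons x xs ih =>
    intro s t s1 t1 h h2
    by_cases hx' : x.length = 0
    · by_cases hs : s1 = []
      · rw [List.foldl_cons, show pvStep (s, t, s1, t1) x = (s, t, s1, t1) by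
          simp [pvStep, hx', hs]]
        rw [ih s t s1 t1 h h2]
        simp only [pvG, hs, if_true]
        rw [show get_alt (x :: xs) = get_alt xs by rw [get_alt]; simp [hx']]
      · rw [List.foldl_cons, show pvStep (s, t, s1, t1) x = (s ++ [s1], t ++ [t1], [], []) by
          simp [pvStep, hx', hs]]
        rw [ih _ _ [] [] (by simp [h]) rfl]
        simp only [pvG, hs, if_true, if_false, List.zip_append h]
        rw [show splitRun (x :: xs) = ([], x :: xs) by rw [splitRun]; simp [hx']]
        rw [show get_alt (x :: xs) = get_alt xs by rw [get_alt]; simp [hx']]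
        simp
    · rw [List.foldl_cons, show pvStep (s, t, s1, t1) x =
          (s, t, s1 ++ [x.getD 0 0], t1 ++ [x.getD 1 0]) by simp [pvStep, hx']]
      rw [ih _ _ _ _ h (by simp [h2])]
      have hne : s1 ++ [x.getD 0 0] ≠ [] := by simp
      have hsr : splitRun (x :: xs) = (x :: (splitRun xs).1, (splitRun xs).2) := by
        rw [splitRun]; simp [hx']
      by_cases hs : s1 = []
      · have ht : t1 = [] := by rw [hs] at h2; exact List.length_eq_zero_iff.mp h2.symm
        simp only [pvG, hs, if_true]
        rw [show get_alt (x :: xs) =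
            [(x :: (splitRun xs).1).map (fun r => r.getD 0 0),
             (x :: (splitRun xs).1).map (fun r => r.getD 1 0)] :: get_alt (splitRun xs).2 by
          rw [get_alt]; simp [hx']]
        simp [ht]
      · simp only [pvG, hne, if_false, hs, hsr]
        simp

-- ===== VERDICT (by name: the statement is the Claim_ definition above) =====
theorem get_spec : Claim_equal_get := by
  intro data _ _
  show get data = get_alt data
  have hg : get data = pvFin (data.foldl pvStep ([], [], [], [])) := rfl
  rw [hg, pvMain data [] [] [] [] rfl rfl]
  simp [pvG]
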